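-- pv_equiv track=rewrite | github.com/AdamAtkins-Public/current | Project_Euler/python/p066.py | minimal_m
-- ===== SOURCE A (Python) =====
-- def m_(a,b,k):
--     k = k.__abs__()
--     #solutions to k | a+bm
--     term_0 = int(0)
--     while not (a+(b*term_0)) % k == 0:
--         term_0 += 1
--     i = int(0)
--     while True:
--         yield k*i + term_0
--         i += 1
--
-- def minimal_m(a,b,k,D):
--     gen_m = m_(a,b,k)
--     minimum = D**2
--     minimum_m = None
--     while True:
--         m = gen_m.__next__()
--         value = m**2 - D
--         value = value.__abs__()
--         if value < minimum:
--             minimum = value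
--             minimum_m = m
--         else:
--             break
--     return minimum_m
-- ===== SOURCE B (Python) =====
-- from math import isqrt
--
-- def minimal_m(a, b, k, D):
--     # closed form: jump straight to the progression member nearest sqrt(D)
--     k = abs(k)
--     t0 = 0
--     while (a + b * t0) % k != 0:
--         t0 += 1
--     if abs(t0 * t0 - D) >= D * D:
--         return None  # no member of the progression improves on the initial bound
--     if t0 * t0 > D:
--         return t0
--     c = (isqrt(D) - t0) // k
--     m = t0 + c * k
--     if abs((m + k) * (m + k) - D) < abs(m * m - D):
--         return m + k
--     return m
-- ===== Notes on version B (the rewrite author's own statement) =====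
-- stated objective: alternative
-- what changed: B replaces A's linear scan over the arithmetic progression up to sqrt(D) by a closed-form jump (math.isqrt) to the progression member nearest sqrt(D) plus a single neighbour comparison; it trades A's scan loop for integer-sqrt arithmetic (the term_0 search loop remains, and dominates the cost on large k).
-- outside the precondition, e.g. on minimal_m(0, 0, 1, 0): A returns None, B returns None; on minimal_m(0, 1, 0, 5): A raises ZeroDivisionError, B raises ZeroDivisionError
import Mathlib
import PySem

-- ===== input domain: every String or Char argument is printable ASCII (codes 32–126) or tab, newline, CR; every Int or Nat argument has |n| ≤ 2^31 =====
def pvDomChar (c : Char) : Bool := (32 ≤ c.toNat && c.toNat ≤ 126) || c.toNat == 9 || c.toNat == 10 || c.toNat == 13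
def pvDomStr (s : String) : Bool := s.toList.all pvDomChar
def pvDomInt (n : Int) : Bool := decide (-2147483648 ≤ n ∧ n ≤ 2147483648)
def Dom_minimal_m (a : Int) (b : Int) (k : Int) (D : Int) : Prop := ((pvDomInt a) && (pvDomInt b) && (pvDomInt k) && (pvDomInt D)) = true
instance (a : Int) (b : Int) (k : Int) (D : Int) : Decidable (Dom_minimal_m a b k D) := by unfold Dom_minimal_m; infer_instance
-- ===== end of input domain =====

-- B replaces A's linear scan of the progression by a closed-form jump (isqrt) to the member
-- nearest √D, checking one neighbour; objective: alternative algorithm, same measured cost.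
-- Pre_ excludes inputs where A raises (k = 0), diverges (no progression solves k | a+b·t),
-- or returns None instead of an int (no progression member beats the initial bound D²).


-- shared helper: Python's `while (a + b*t) % k != 0: t += 1` starting from t, with fuel
-- (both Pythons contain this very loop verbatim; it diverges when no solution exists, which Pre_ excludes)
def t0Loop (a : Int) (b : Int) (kk : Int) : Nat → Int → Int
  | 0, t => t
  | f + 1, t => if PySem.Int.mod (a + b * t) kk = 0 then t else t0Loop a b kk f (t + 1)

-- ===== PORT A =====
-- A's inner `while True` loop; the generator's `k*i + term_0` is inlined as `m`.
-- Fuel: `minimum` strictly decreases and stays ≥ 0 while looping, so (D*D).natAbs + 3 steps always suffice.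
def scanA (kk : Int) (t0 : Int) (D : Int) : Nat → Int → Int → Option Int → Option Int
  | 0, _, _, mm => mm
  | f + 1, i, minimum, mm =>
    let m := kk * i + t0
    let value := |m ^ 2 - D|
    if value < minimum then scanA kk t0 D f (i + 1) value (some m)
    else mm

def minimal_m (a : Int) (b : Int) (k : Int) (D : Int) : Int :=
  let kk := |k|
  let t0 := t0Loop a b kk (kk.natAbs + 1) 0
  -- Python returns None when no member improved on D**2; Pre_ excludes that, `.getD 0` is a placeholder
  (scanA kk t0 D ((D * D).natAbs + 3) 0 (D ^ 2) none).getD 0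

-- ===== PORT B =====
def minimal_m_alt (a : Int) (b : Int) (k : Int) (D : Int) : Int :=
  let kk := |k|
  let t0 := t0Loop a b kk (kk.natAbs + 1) 0
  if D * D ≤ |t0 * t0 - D| then 0      -- Python B returns None here (outside Pre_)
  else if D < t0 * t0 then t0
  else
    let c := PySem.Int.floordiv (Int.sqrt D - t0) kk   -- math.isqrt ported as Int.sqrt (exact for D ≥ 0, guaranteed here)
    let m := t0 + c * kk
    if |(m + kk) * (m + kk) - D| < |m * m - D| then m + kk else m

-- ===== PRECONDITION & SPEC =====
-- pvT0: closed form (extended gcd) for the smallest t >= 0 with |k| dividing a + b*t (when it exists)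
def pvT0 (a : Int) (b : Int) (k : Int) : Int :=
  let g : Int := Int.gcd b |k|
  let kg : Int := |k| / g
  (-(a / g) * Int.gcdA (b / g) kg) % kg

-- Pre_ excludes: k = 0 (A raises ZeroDivisionError); inputs where |k| never divides a + b*t
-- (A's term_0 search diverges); and inputs whose minimal such t satisfies |t*t-D| >= D*D
-- (A returns None, which is not an int).
def Pre_minimal_m (a : Int) (b : Int) (k : Int) (D : Int) : Prop :=
  k ≠ 0 ∧ (Int.gcd b |k| : Int) ∣ a ∧ |pvT0 a b k * pvT0 a b k - D| < D * D

instance (a : Int) (b : Int) (k : Int) (D : Int) : Decidable (Pre_minimal_m a b k D) := by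
  unfold Pre_minimal_m; infer_instance

def pvWitness_minimal_m : Int × Int × Int × Int := (1, 1, 2, 5)

def Spec_minimal_m (a : Int) (b : Int) (k : Int) (D : Int) (out : Int) : Prop := out = minimal_m_alt a b k D
instance (a : Int) (b : Int) (k : Int) (D : Int) (out : Int) : Decidable (Spec_minimal_m a b k D out) := by unfold Spec_minimal_m; infer_instance

-- ===== CLAIM (what is proved, stated in full; the proofs are below) =====
def Claim_equal_minimal_m : Prop := ∀ (a : Int) (b : Int) (k : Int) (D : Int), Dom_minimal_m a b k D → Pre_minimal_m a b k D → Spec_minimal_m a b k D (minimal_m a b k D)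

-- ===== LEMMAS AND PROOFS =====

-- pvT0 is the least nonnegative solution of |k| ∣ a + b*t, and it lies below |k|
theorem pvT0_spec (a b k : Int) (hk : k ≠ 0) (ha : (Int.gcd b |k| : Int) ∣ a) :
    0 ≤ pvT0 a b k ∧ pvT0 a b k < |k| ∧
    PySem.Int.mod (a + b * pvT0 a b k) |k| = 0 ∧
    (∀ u : Int, 0 ≤ u → u < pvT0 a b k → PySem.Int.mod (a + b * u) |k| ≠ 0) := by
  have habs : (0 : Int) < |k| := abs_pos.mpr hk
  have hgne : Int.gcd b |k| ≠ 0 := fun h => by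
    have := (Int.gcd_eq_zero_iff.mp h).2; omega
  have hgpos : (0 : Int) < (Int.gcd b |k| : Int) := by exact_mod_cast Nat.pos_of_ne_zero hgne
  set g : Int := (Int.gcd b |k| : Int) with hgdef
  have hgb : g ∣ b := Int.gcd_dvd_left b |k|
  have hgk : g ∣ |k| := Int.gcd_dvd_right b |k|
  set kg : Int := |k| / g with hkgdef
  have hkgmul : g * kg = |k| := Int.mul_ediv_cancel' hgk
  have hkgpos : 0 < kg := by nlinarith
  have hcop : Int.gcd (b / g) kg = 1 := Int.gcd_div_gcd_div_gcd (by exact_mod_cast Nat.pos_of_ne_zero hgne)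
  set A : Int := Int.gcdA (b / g) kg with hAdef
  have hbez : ((Int.gcd (b / g) kg : Int)) = (b / g) * A + kg * Int.gcdB (b / g) kg :=
    Int.gcd_eq_gcd_ab (b / g) kg
  rw [hcop] at hbez
  push_cast at hbez
  have hT : pvT0 a b k = (-(a / g) * A) % kg := rfl
  set t : Int := pvT0 a b k with htdef
  have ht0 : 0 ≤ t := by rw [hT]; exact Int.emod_nonneg _ (ne_of_gt hkgpos)
  have htlt : t < kg := by rw [hT]; exact Int.emod_lt_of_pos _ hkgpos
  have htltk : t < |k| := by nlinarith
  -- kg divides (b/g)*t + a/g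
  have key : kg ∣ (b / g) * t + (a / g) := by
    have h2 : Int.ModEq kg t (-(a / g) * A) := by
      unfold Int.ModEq
      rw [hT, Int.emod_emod_of_dvd _ dvd_rfl]
    have h3 : Int.ModEq kg ((b / g) * t) ((b / g) * (-(a / g) * A)) := h2.mul_left _
    have h4 : Int.ModEq kg ((b / g) * A) 1 :=
      Int.modEq_iff_dvd.mpr ⟨Int.gcdB (b / g) kg, by linarith [hbez]⟩
    have h5 : Int.ModEq kg ((b / g) * (-(a / g) * A)) (-(a / g)) := by
      have he : (b / g) * (-(a / g) * A) = -(a / g) * ((b / g) * A) := by ring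
      have := h4.mul_left (-(a / g))
      rw [he]
      simpa using this
    have h6 : Int.ModEq kg ((b / g) * t) (-(a / g)) := h3.trans h5
    obtain ⟨w, hw⟩ := Int.modEq_iff_dvd.mp h6
    exact ⟨-w, by linarith [hw]⟩
  have hexp : g * ((b / g) * t + (a / g)) = a + b * t := by
    rw [mul_add, ← mul_assoc, Int.mul_ediv_cancel' hgb, Int.mul_ediv_cancel' ha]; ring
  have hsol : |k| ∣ a + b * t := by
    have := mul_dvd_mul_left g key
    rwa [hkgmul, hexp] at this
  refine ⟨ht0, htltk, (PySem.Int.mod_eq_zero_iff_dvd _ _).mpr hsol, ?_⟩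
  intro u hu hut hmod
  have hsolu : |k| ∣ a + b * u := (PySem.Int.mod_eq_zero_iff_dvd _ _).mp hmod
  have hdiff : |k| ∣ b * (t - u) := by
    have := dvd_sub hsol hsolu
    rwa [show a + b * t - (a + b * u) = b * (t - u) from by ring] at this
  have hdiff2 : g * kg ∣ g * ((b / g) * (t - u)) := by
    rw [hkgmul, ← mul_assoc, Int.mul_ediv_cancel' hgb]
    exact hdiff
  have hdiff3 : kg ∣ (b / g) * (t - u) :=
    (mul_dvd_mul_iff_left (ne_of_gt hgpos)).mp hdiff2
  have hdiff4 : kg ∣ (t - u) := by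
    have hcop2 : IsCoprime kg (b / g) := by
      rw [Int.isCoprime_iff_gcd_eq_one, Int.gcd_comm]
      exact hcop
    exact hcop2.dvd_of_dvd_mul_left hdiff3
  have : kg ≤ t - u := Int.le_of_dvd (by omega) hdiff4
  omega

-- the fueled first-fit search returns the minimal solution when it is in range
theorem t0Loop_eq (a b kk th : Int)
    (hsol : PySem.Int.mod (a + b * th) kk = 0)
    (hmin : ∀ u : Int, 0 ≤ u → u < th → PySem.Int.mod (a + b * u) kk ≠ 0) :
    ∀ (f : Nat) (s : Int), 0 ≤ s → s ≤ th → th < s + f → t0Loop a b kk f s = th := by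
  intro f
  induction f with
  | zero => intro s _ _ h; omega
  | succ f ih =>
    intro s hs0 hsle hlt
    by_cases h : PySem.Int.mod (a + b * s) kk = 0
    · have heq : s = th := by
        rcases lt_or_eq_of_le hsle with h' | h'
        · exact absurd h (hmin s hs0 h')
        · exact h'
      subst heq
      simp [t0Loop, h]
    · have hne : s ≠ th := fun he => h (he ▸ hsol)
      simp only [t0Loop, if_neg h]
      exact ih (s + 1) (by omega) (by omega) (by omega)

-- Int.sqrt brackets for D ≥ 0
theorem sqrt_sq_le (D : Int) (h : 0 ≤ D) : Int.sqrt D * Int.sqrt D ≤ D := by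
  unfold Int.sqrt
  nlinarith [Int.toNat_of_nonneg h, Nat.sqrt_le' D.toNat,
    (by exact_mod_cast Nat.sqrt_le' D.toNat : ((Nat.sqrt D.toNat : Int)) ^ 2 ≤ (D.toNat : Int))]

theorem lt_sqrt_succ_sq (D : Int) (h : 0 ≤ D) : D < (Int.sqrt D + 1) * (Int.sqrt D + 1) := by
  unfold Int.sqrt
  have h2 : ((D.toNat : Int)) < ((Nat.sqrt D.toNat + 1 : Nat) : Int) * ((Nat.sqrt D.toNat + 1 : Nat)) := by
    exact_mod_cast by nlinarith [Nat.lt_succ_sqrt' D.toNat]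
  push_cast at h2 ⊢
  nlinarith [Int.toNat_of_nonneg h]

-- the climb: while m_i² ≤ D the scan strictly improves, and it stops right after index c
theorem scanA_climb (kk t0 D c : Int) (hkk : 1 ≤ kk) (ht0 : 0 ≤ t0)
    (hc0 : 0 ≤ c)
    (hcle : (kk * c + t0) * (kk * c + t0) ≤ D)
    (hcgt : D < (kk * c + t0 + kk) * (kk * c + t0 + kk)) :
    ∀ (n : Nat) (i minimum : Int) (mm : Option Int) (f : Nat),
      0 ≤ i → i + n = c → D - (kk * i + t0) ^ 2 < minimum → n + 3 ≤ f →
      scanA kk t0 D f i minimum mm =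
        some (if |(kk * c + t0 + kk) * (kk * c + t0 + kk) - D| < |(kk * c + t0) * (kk * c + t0) - D|
              then kk * c + t0 + kk else kk * c + t0) := by
  intro n
  induction n with
  | zero =>
    intro i minimum mm f hi0 hic hlt hf
    obtain rfl : c = i := by omega
    obtain ⟨f', rfl⟩ : ∃ f', f = f' + 3 := ⟨f - 3, by omega⟩
    have hmc0 : 0 ≤ kk * c + t0 := by nlinarith
    have habsc : |(kk * c + t0) ^ 2 - D| = D - (kk * c + t0) * (kk * c + t0) := by
      rw [abs_of_nonpos (by nlinarith)]; ring
    have habsd : |(kk * (c + 1) + t0) ^ 2 - D| = (kk * c + t0 + kk) * (kk * c + t0 + kk) - D := by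
      rw [abs_of_nonneg (by nlinarith)]; ring
    have habse : |(kk * (c + 1 + 1) + t0) ^ 2 - D| =
        (kk * c + t0 + kk + kk) * (kk * c + t0 + kk + kk) - D := by
      rw [abs_of_nonneg (by nlinarith)]; ring
    have habsd' : |(kk * c + t0 + kk) * (kk * c + t0 + kk) - D| =
        (kk * c + t0 + kk) * (kk * c + t0 + kk) - D := abs_of_nonneg (by nlinarith)
    have habsc' : |(kk * c + t0) * (kk * c + t0) - D| = D - (kk * c + t0) * (kk * c + t0) := by
      rw [abs_of_nonpos (by nlinarith)]; ring
    simp only [scanA]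
    rw [if_pos (by rw [habsc]; nlinarith)]
    by_cases hd : (kk * c + t0 + kk) * (kk * c + t0 + kk) - D < D - (kk * c + t0) * (kk * c + t0)
    · rw [if_pos (by rw [habsd, habsc]; exact hd)]
      rw [if_neg (by rw [habse, habsd]; nlinarith)]
      rw [if_pos (by rw [habsd', habsc']; exact hd)]
      congr 1; ring
    · rw [if_neg (by rw [habsd, habsc]; exact hd)]
      rw [if_neg (by rw [habsd', habsc']; exact hd)]
  | succ n ih =>
    intro i minimum mm f hi0 hic hlt hf
    obtain ⟨f', rfl⟩ : ∃ f', f = f' + 1 := ⟨f - 1, by omega⟩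
    have hile : i + 1 ≤ c := by omega
    have hmi0 : 0 ≤ kk * i + t0 := by nlinarith
    have hmile : kk * i + t0 + kk ≤ kk * c + t0 := by nlinarith
    have hmc0 : 0 ≤ kk * c + t0 := by nlinarith
    have hisq : (kk * i + t0) * (kk * i + t0) ≤ D := by nlinarith
    have habsi : |(kk * i + t0) ^ 2 - D| = D - (kk * i + t0) * (kk * i + t0) := by
      rw [abs_of_nonpos (by nlinarith)]; ring
    simp only [scanA]
    rw [if_pos (by rw [habsi]; nlinarith)]
    exact ih (i + 1) (|(kk * i + t0) ^ 2 - D|) (some (kk * i + t0)) f' (by omega) (by omega)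
      (by rw [habsi]; nlinarith) (by omega)

-- A's scan when the very first progression member already overshoots: it returns t0
theorem scanA_over (kk t0 D : Int) (hkk : 1 ≤ kk) (ht0 : 0 ≤ t0)
    (hover : D < t0 * t0) (hfirst : |t0 * t0 - D| < D * D) (f : Nat) (hf : 2 ≤ f) :
    scanA kk t0 D f 0 (D ^ 2) none = some t0 := by
  obtain ⟨f', rfl⟩ : ∃ f', f = f' + 2 := ⟨f - 2, by omega⟩
  have habs0 : |(kk * 0 + t0) ^ 2 - D| = t0 * t0 - D := by
    rw [abs_of_nonneg (by nlinarith)]; ring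
  have habs1 : |(kk * (0 + 1) + t0) ^ 2 - D| = (kk + t0) * (kk + t0) - D := by
    rw [abs_of_nonneg (by nlinarith)]; ring
  simp only [scanA]
  rw [if_pos (by rw [habs0]; nlinarith [abs_of_nonneg (by nlinarith : (0:Int) ≤ t0 * t0 - D)]),
      if_neg (by rw [habs0, habs1]; nlinarith)]
  norm_num

theorem minimal_m_spec : Claim_equal_minimal_m := by
  intro a b k D _ hpre
  obtain ⟨hk, ha, hval⟩ := hpre
  obtain ⟨htpos, htltk, hsol, hmin'⟩ := pvT0_spec a b k hk ha
  have hkk : (1 : Int) ≤ |k| := Int.one_le_abs (by omega)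
  set t : Int := pvT0 a b k with htdef
  have ht0 : t0Loop a b |k| (|k|.natAbs + 1) 0 = t :=
    t0Loop_eq a b |k| t hsol hmin' (|k|.natAbs + 1) 0 le_rfl htpos
      (by
        have h3 : ((|k|.natAbs : Int)) = |k| := by
          rw [Int.natCast_natAbs, abs_abs]
        push_cast
        rw [abs_abs]
        linarith)
  unfold Spec_minimal_m minimal_m minimal_m_alt
  simp only [ht0]
  by_cases hover : D < t * t
  · -- first member already overshoots: both return t
    rw [scanA_over |k| t D hkk htpos hover hval ((D * D).natAbs + 3) (by omega)]
    rw [if_neg (not_le.mpr hval), if_pos hover]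
    rfl
  · -- the scan climbs to the member nearest √D
    have htD : t * t ≤ D := not_lt.mp hover
    have hD0 : (0 : Int) ≤ D := le_trans (mul_nonneg htpos htpos) htD
    have hD1 : (1 : Int) ≤ D := by
      rcases eq_or_lt_of_le hD0 with h | h
      · exfalso
        rw [← h] at hval
        have h1 : (0 : Int) ≤ |t * t - 0| := abs_nonneg _
        have h2 : (0 : Int) * 0 = 0 := by ring
        omega
      · omega
    have hs0 : 0 ≤ Int.sqrt D := Int.sqrt_nonneg D
    have hssq : Int.sqrt D * Int.sqrt D ≤ D := sqrt_sq_le D hD0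
    have hslt : D < (Int.sqrt D + 1) * (Int.sqrt D + 1) := lt_sqrt_succ_sq D hD0
    have hts : t ≤ Int.sqrt D := by nlinarith
    set c := PySem.Int.floordiv (Int.sqrt D - t) |k| with hc
    have hc0 : 0 ≤ c := (PySem.Int.le_floordiv_iff_mul_le (by omega)).mpr (by nlinarith)
    have hlow : c * |k| ≤ Int.sqrt D - t :=
      (PySem.Int.le_floordiv_iff_mul_le (by omega)).mp le_rfl
    have hhigh : Int.sqrt D - t < (c + 1) * |k| :=
      (PySem.Int.floordiv_lt_iff_lt_mul (by omega)).mp (lt_add_one c)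
    have hmc0 : 0 ≤ |k| * c + t := by nlinarith
    have hmcs : |k| * c + t ≤ Int.sqrt D := by nlinarith
    have hcle : (|k| * c + t) * (|k| * c + t) ≤ D := by nlinarith
    have hcgt : D < (|k| * c + t + |k|) * (|k| * c + t + |k|) := by nlinarith
    have hcD : c ≤ D * D := by nlinarith
    rw [scanA_climb |k| t D c hkk htpos hc0 hcle hcgt
      c.toNat 0 (D ^ 2) none ((D * D).natAbs + 3) le_rfl (by omega)
      (by rw [show |k| * 0 + t = t from by ring]
          have : |t * t - D| = D - t * t := by
            rw [abs_of_nonpos (by omega)]; ring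
          nlinarith)
      (by omega)]
    rw [if_neg (not_le.mpr hval), if_neg (not_lt.mpr htD)]
    rw [show |k| * c + t = t + c * |k| from by ring]
    rfl
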